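-- pv_equiv track=rewrite | github.com/ChanukOh/noob | 프로그래머스/0/181854. 배열의 길이에 따라 다른 연산하기/배열의 길이에 따라 다른 연산하기.py | solution
-- ===== SOURCE A (Python) =====
-- def solution(arr, n):
--     answer=[]
--     if len(arr)%2==1:
--         for i,a in enumerate(arr):
--             if i%2==0:
--                 answer.append(a+n)
--             else:
--                 answer.append(a)
--     if len(arr)%2==0:
--         for i,a in enumerate(arr):
--             if i%2==1:
--                 answer.append(a+n)
--             else:
--                 answer.append(a)
--     return answer
-- ===== SOURCE B (Python) =====
-- def solution(arr, n):
--     answer = arr[:]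
--     start = 0 if len(arr) % 2 == 1 else 1
--     answer[start::2] = [x + n for x in answer[start::2]]
--     return answer
-- ===== Notes on version B (the rewrite author's own statement) =====
-- stated objective: idiomatic
-- what changed: Replaces the two length-guarded enumerate loops with a per-index parity branch by copying the list and overwriting the strided slice answer[start::2] (start from the length's parity) in one slice assignment.
import Mathlib
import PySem

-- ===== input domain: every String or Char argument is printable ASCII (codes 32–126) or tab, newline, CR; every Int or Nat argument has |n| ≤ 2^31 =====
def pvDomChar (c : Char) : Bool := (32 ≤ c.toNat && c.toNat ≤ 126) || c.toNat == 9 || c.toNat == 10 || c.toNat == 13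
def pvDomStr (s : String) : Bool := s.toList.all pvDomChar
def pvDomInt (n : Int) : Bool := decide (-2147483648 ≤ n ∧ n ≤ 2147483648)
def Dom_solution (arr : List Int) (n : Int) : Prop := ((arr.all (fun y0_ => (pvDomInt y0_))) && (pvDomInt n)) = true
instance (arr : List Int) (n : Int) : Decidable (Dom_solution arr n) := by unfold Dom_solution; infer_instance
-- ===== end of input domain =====

-- B replaces A's two length-guarded per-index-parity loops by a copy plus one strided-slice
-- overwrite answer[start::2]; objective: idiomatic (same O(n) cost).

-- ===== PORT A =====
-- literal transliteration: empty answer, two length-parity-guarded enumerate loops appending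
def solution (arr : List Int) (n : Int) : List Int :=
  let answer : List Int := []
  let answer :=
    if arr.length % 2 = 1 then
      (PySem.List.enumerate arr).foldl
        (fun acc p => if p.1 % 2 = 0 then acc ++ [p.2 + n] else acc ++ [p.2]) answer
    else answer
  let answer :=
    if arr.length % 2 = 0 then
      (PySem.List.enumerate arr).foldl
        (fun acc p => if p.1 % 2 = 1 then acc ++ [p.2 + n] else acc ++ [p.2]) answer
    else answer
  answer

-- ===== PORT B =====
-- answer[start::2] read: elements at positions start, start+2, …
def everyOther : List Int → List Int
  | [] => []
  | [x] => [x]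
  | x :: _ :: rest => x :: everyOther rest

-- strided-slice assignment xs[0::2] = ys (lengths match by construction in B)
def setEvery : List Int → List Int → List Int
  | [], _ => []
  | x :: rest, [] => x :: rest
  | [_], y :: _ => [y]
  | _ :: z :: rest, y :: ys => y :: z :: setEvery rest ys

def solution_alt (arr : List Int) (n : Int) : List Int :=
  let answer := PySem.List.slice arr none none        -- arr[:]
  let start : Nat := if arr.length % 2 = 1 then 0 else 1
  let vals := (everyOther (answer.drop start)).map (· + n)   -- [x + n for x in answer[start::2]]
  answer.take start ++ setEvery (answer.drop start) vals     -- answer[start::2] = vals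

-- ===== PRECONDITION & SPEC =====
def Spec_solution (arr : List Int) (n : Int) (out : List Int) : Prop := out = solution_alt arr n
instance (arr : List Int) (n : Int) (out : List Int) : Decidable (Spec_solution arr n out) := by unfold Spec_solution; infer_instance

-- ===== CLAIM (what is proved, stated in full; the proofs are below) =====
def Claim_equal_solution : Prop := ∀ (arr : List Int) (n : Int), Dom_solution arr n → Spec_solution arr n (solution arr n)

-- ===== LEMMAS AND PROOFS =====

theorem foldl_app_even (n : Int) : ∀ (l : List (Int × Int)) (acc : List Int),
    l.foldl (fun acc p => if p.1 % 2 = 0 then acc ++ [p.2 + n] else acc ++ [p.2]) acc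
      = acc ++ l.map (fun p => if p.1 % 2 = 0 then p.2 + n else p.2) := by
  intro l
  induction l with
  | nil => intro acc; simp only [List.foldl_nil, List.map_nil, List.append_nil]
  | cons p l ih =>
    intro acc
    simp only [List.foldl_cons, List.map_cons, ih]
    split <;> simp

theorem foldl_app_odd (n : Int) : ∀ (l : List (Int × Int)) (acc : List Int),
    l.foldl (fun acc p => if p.1 % 2 = 1 then acc ++ [p.2 + n] else acc ++ [p.2]) acc
      = acc ++ l.map (fun p => if p.1 % 2 = 1 then p.2 + n else p.2) := by
  intro l
  induction l with
  | nil => intro acc; simp only [List.foldl_nil, List.map_nil, List.append_nil]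
  | cons p l ih =>
    intro acc
    simp only [List.foldl_cons, List.map_cons, ih]
    split <;> simp

theorem map_even_enum (n : Int) : ∀ (xs : List Int) (i : Int), i % 2 = 0 →
    (PySem.List.enumerate xs i).map (fun p => if p.1 % 2 = 0 then p.2 + n else p.2)
      = setEvery xs ((everyOther xs).map (· + n)) := by
  intro xs
  induction xs using everyOther.induct with
  | case1 => intro i _; simp only [PySem.List.enumerate_nil, List.map_nil, setEvery]
  | case2 x =>
    intro i hi
    simp only [PySem.List.enumerate_nil, PySem.List.enumerate_cons, List.map_cons, List.map_nil,
      everyOther, setEvery, if_pos hi]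
  | case3 x y rest ih =>
    intro i hi
    have h1 : ¬ (i + 1) % 2 = 0 := by omega
    simp only [PySem.List.enumerate_cons, List.map_cons, everyOther, setEvery,
      if_pos hi, if_neg h1, ih (i + 1 + 1) (by omega)]

theorem map_odd_enum (n : Int) : ∀ (xs : List Int) (i : Int), i % 2 = 1 →
    (PySem.List.enumerate xs i).map (fun p => if p.1 % 2 = 1 then p.2 + n else p.2)
      = setEvery xs ((everyOther xs).map (· + n)) := by
  intro xs
  induction xs using everyOther.induct with
  | case1 => intro i _; simp only [PySem.List.enumerate_nil, List.map_nil, setEvery]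
  | case2 x =>
    intro i hi
    simp only [PySem.List.enumerate_nil, PySem.List.enumerate_cons, List.map_cons, List.map_nil,
      everyOther, setEvery, if_pos hi]
  | case3 x y rest ih =>
    intro i hi
    have h1 : ¬ (i + 1) % 2 = 1 := by omega
    simp only [PySem.List.enumerate_cons, List.map_cons, everyOther, setEvery,
      if_pos hi, if_neg h1, ih (i + 1 + 1) (by omega)]

-- ===== VERDICT (by name: the statement is the Claim_ definition above) =====
theorem solution_spec : Claim_equal_solution := by
  intro arr n _
  unfold Spec_solution solution solution_alt
  simp only [PySem.List.slice_none_none]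
  by_cases hod : arr.length % 2 = 1
  · have hev : ¬ arr.length % 2 = 0 := by omega
    simp only [if_pos hod, if_neg hev, List.take_zero, List.drop_zero, List.nil_append,
      foldl_app_even, map_even_enum n arr 0 rfl]
  · have hev : arr.length % 2 = 0 := by omega
    simp only [if_pos hev, if_neg hod]
    cases arr with
    | nil => simp only [PySem.List.enumerate_nil, List.foldl_nil, List.take_nil, List.drop_nil,
        everyOther, setEvery, List.map_nil, List.append_nil]
    | cons x rest =>
      have h1 : ¬ (0 : Int) % 2 = 1 := by decide
      simp only [foldl_app_odd, PySem.List.enumerate_cons, List.map_cons, if_neg h1,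
        List.nil_append, List.take_succ_cons, List.take_zero, List.drop_succ_cons, List.drop_zero,
        List.singleton_append]
      rw [map_odd_enum n rest (0 + 1) (by decide)]
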